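-- pv_equiv track=rewrite | github.com/zlightho/algo | task1.py | squirrel
-- ===== SOURCE A (Python) =====
-- def squirrel(N:int) -> int:
--     """Get as param digit N, and return first number factorial N!"""
--     number = 1
--     while N > 0:
--         number = number * N
--         N -=1
--     while number > 9:
--         number = number // 10
--     return number
-- ===== SOURCE B (Python) =====
-- def squirrel(N: int) -> int:
--     def prod(a, b):
--         if a > b:
--             return 1
--         if a == b:
--             return a
--         m = (a + b) // 2
--         return prod(a, m) * prod(m + 1, b)
--     f = prod(1, N)
--     while f > 9:
--         p = 10
--         while p * p <= f:
--             p = p * p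
--         f //= p
--     return f
-- ===== Notes on version B (the rewrite author's own statement) =====
-- stated objective: faster
-- what changed: the 1*2*...*N running-product loop becomes a balanced binary-splitting product of 1..N, and the digit-at-a-time //10 reduction becomes division by repeatedly squared powers of 10, halving the digit count per step
import Mathlib
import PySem

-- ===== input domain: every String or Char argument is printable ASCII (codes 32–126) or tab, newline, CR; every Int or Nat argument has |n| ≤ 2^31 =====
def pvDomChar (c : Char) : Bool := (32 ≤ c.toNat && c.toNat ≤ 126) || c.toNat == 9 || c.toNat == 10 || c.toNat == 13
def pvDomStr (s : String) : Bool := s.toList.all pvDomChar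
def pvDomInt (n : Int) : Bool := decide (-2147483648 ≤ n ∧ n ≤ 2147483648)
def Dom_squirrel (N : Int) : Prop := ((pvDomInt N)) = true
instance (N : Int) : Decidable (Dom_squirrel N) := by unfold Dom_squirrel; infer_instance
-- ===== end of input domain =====

-- B computes the product of 1..N by balanced binary splitting and strips digits by dividing by squared powers of 10 (objective: faster; a timing run measures it).

-- ===== PORT A =====
-- 'while N > 0: number = number * N; N -= 1'
def squirrelLoop (N acc : Int) : Int :=
  if 0 < N then squirrelLoop (N - 1) (acc * N) else acc
termination_by N.toNat
decreasing_by omega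

-- 'while number > 9: number = number // 10'
def squirrelReduce (n : Int) : Int :=
  if 9 < n then squirrelReduce (PySem.Int.floordiv n 10) else n
termination_by n.toNat
decreasing_by
  rename_i h
  rw [PySem.Int.floordiv_eq_ediv_of_pos (by omega : (0:Int) < 10)]
  omega

def squirrel (N : Int) : Int :=
  squirrelReduce (squirrelLoop N 1)

-- ===== PORT B =====
-- 'def prod(a, b): ...' — balanced binary-splitting product of a..b
def prodRange (a b : Int) : Int :=
  if b < a then 1
  else if a = b then a
  else
    let m := PySem.Int.floordiv (a + b) 2
    prodRange a m * prodRange (m + 1) b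
termination_by (b - a).toNat
decreasing_by
  all_goals
    rename_i h1 h2
    rw [PySem.Int.floordiv_eq_ediv_of_pos (by omega : (0:Int) < 2)]
    omega

-- 'p = 10; while p * p <= f: p = p * p'  (the '1 < p' conjunct only makes the
-- recursion total; it holds on every call the port makes, since p starts at 10)
def powUp (p f : Int) : Int :=
  if hg : 1 < p ∧ p * p ≤ f then powUp (p * p) f else p
termination_by (f - p).toNat
decreasing_by
  obtain ⟨hp, hpf⟩ := hg
  have h1 : p < p * p := by nlinarith
  generalize p * p = q at h1 hpf ⊢
  omega

-- termination fact for the outer loop (cited by name in 'decreasing_by' below)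
theorem powUp_ge (p f : Int) (hp : 0 ≤ p) : p ≤ powUp p f := by
  rw [powUp]
  split
  · rename_i h
    calc p ≤ p * p := by nlinarith [h.1]
      _ ≤ powUp (p * p) f := powUp_ge (p * p) f (by nlinarith)
  · exact le_refl p
termination_by (f - p).toNat
decreasing_by
  rename_i h
  obtain ⟨hp', hpf⟩ := h
  have h1 : p < p * p := by nlinarith
  generalize p * p = q at h1 hpf ⊢
  omega

-- 'while f > 9: p = 10; while p*p <= f: p = p*p; f //= p'
def altReduce (f : Int) : Int :=
  if 9 < f then altReduce (PySem.Int.floordiv f (powUp 10 f)) else f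
termination_by f.toNat
decreasing_by
  have h10 : (10:Int) ≤ powUp 10 f := powUp_ge 10 f (by omega)
  have h1 : PySem.Int.floordiv f (powUp 10 f) < f := by
    rw [PySem.Int.floordiv_lt_iff_lt_mul (by omega : (0:Int) < powUp 10 f)]
    nlinarith
  have h2 : 0 ≤ PySem.Int.floordiv f (powUp 10 f) := by
    rw [PySem.Int.floordiv_eq_ediv_of_pos (by omega : (0:Int) < powUp 10 f)]
    exact Int.ediv_nonneg (by omega) (by omega)
  omega


def squirrel_alt (N : Int) : Int :=
  altReduce (prodRange 1 N)

-- ===== PRECONDITION & SPEC =====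
def Spec_squirrel (N : Int) (out : Int) : Prop := out = squirrel_alt N
instance (N : Int) (out : Int) : Decidable (Spec_squirrel N out) := by unfold Spec_squirrel; infer_instance

-- ===== CLAIM (what is proved, stated in full; the proofs are below) =====
def Claim_equal_squirrel : Prop := ∀ (N : Int), Dom_squirrel N → Spec_squirrel N (squirrel N)

-- ===== LEMMAS AND PROOFS =====

theorem Ioc_pred_self (n : Int) : Finset.Ioc (n - 1) n = {n} := by
  ext x
  simp only [Finset.mem_Ioc, Finset.mem_singleton]
  omega

theorem prod_Ioc_pred (n : Int) : (∏ x ∈ Finset.Ioc (n - 1) n, x) = n := by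
  rw [Ioc_pred_self]; simp

-- the binary-splitting product computes the product of the integer interval
theorem prodRange_eq (a b : Int) : prodRange a b = ∏ x ∈ Finset.Ioc (a - 1) b, x := by
  by_cases hba : b < a
  · rw [prodRange]
    simp [hba]
  · by_cases hab : a = b
    · subst hab
      rw [prodRange]
      simp [prod_Ioc_pred]
    · have hlt : a < b := by omega
      rw [prodRange]
      simp only [if_neg (by omega : ¬ b < a), if_neg hab]
      have h2 : (0:Int) < 2 := by omega
      set m := PySem.Int.floordiv (a + b) 2 with hm
      have hm' : m = (a + b) / 2 := by rw [hm, PySem.Int.floordiv_eq_ediv_of_pos h2]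
      have hma : a ≤ m := by omega
      have hmb : m < b := by omega
      rw [prodRange_eq a m, prodRange_eq (m + 1) b]
      rw [show m + 1 - 1 = m by omega,
        ← Finset.Ioc_union_Ioc_eq_Ioc (by omega : a - 1 ≤ m) (by omega : m ≤ b),
        Finset.prod_union (Finset.Ioc_disjoint_Ioc_of_le (le_refl m))]
termination_by (b - a).toNat
decreasing_by
  all_goals
    rw [PySem.Int.floordiv_eq_ediv_of_pos (by omega : (0:Int) < 2)]
    omega

-- A's running-product loop computes acc times the same product
theorem squirrelLoop_eq (N acc : Int) :
    squirrelLoop N acc = acc * ∏ x ∈ Finset.Ioc 0 N, x := by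
  by_cases h : 0 < N
  · rw [squirrelLoop, if_pos h, squirrelLoop_eq (N - 1) (acc * N)]
    rw [← Finset.Ioc_union_Ioc_eq_Ioc (by omega : (0:Int) ≤ N - 1) (by omega : N - 1 ≤ N),
      Finset.prod_union (Finset.Ioc_disjoint_Ioc_of_le (le_refl (N - 1))), prod_Ioc_pred N]
    ring
  · rw [squirrelLoop, if_neg h]
    simp [Finset.Ioc_eq_empty (by omega : ¬ ((0:Int) < N))]
termination_by N.toNat
decreasing_by omega

-- powUp, started at a positive power of 10 no larger than f, returns a positive power of 10 no larger than f
theorem powUp_pow10_aux (n : ℕ) : ∀ p f : Int, (∃ k : ℕ, 1 ≤ k ∧ p = 10 ^ k) → p ≤ f →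
    (f - p).toNat ≤ n → ∃ k : ℕ, 1 ≤ k ∧ powUp p f = 10 ^ k ∧ 10 ^ k ≤ f := by
  induction n with
  | zero =>
    rintro p f ⟨k, hk1, rfl⟩ hpf hn
    have hp1 : (1:Int) < 10 ^ k := by
      calc (1:Int) < 10 ^ 1 := by norm_num
        _ ≤ 10 ^ k := pow_le_pow_right₀ (by norm_num) hk1
    rw [powUp]
    split
    · rename_i hc
      exfalso
      have hfp : f ≤ 10 ^ k := by
        generalize hP : (10:Int) ^ k = P at hn hpf ⊢
        omega
      nlinarith [hc.1, hc.2]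
    · exact ⟨k, hk1, rfl, hpf⟩
  | succ n ih =>
    rintro p f ⟨k, hk1, rfl⟩ hpf hn
    have hp1 : (1:Int) < 10 ^ k := by
      calc (1:Int) < 10 ^ 1 := by norm_num
        _ ≤ 10 ^ k := pow_le_pow_right₀ (by norm_num) hk1
    rw [powUp]
    split
    · rename_i hc
      refine ih (10 ^ k * 10 ^ k) f ⟨k + k, by omega, by rw [pow_add]⟩ hc.2 ?_
      have h1 : (10:Int) ^ k < 10 ^ k * 10 ^ k := by nlinarith
      have h2 := hc.2
      generalize hQ : (10:Int) ^ k * 10 ^ k = Q at h1 h2 ⊢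
      generalize hP : (10:Int) ^ k = P at h1 hn ⊢
      omega
    · exact ⟨k, hk1, rfl, hpf⟩

theorem powUp_pow10 (p f : Int) (h : ∃ k : ℕ, 1 ≤ k ∧ p = 10 ^ k) (hpf : p ≤ f) :
    ∃ k : ℕ, 1 ≤ k ∧ powUp p f = 10 ^ k ∧ 10 ^ k ≤ f :=
  powUp_pow10_aux (f - p).toNat p f h hpf (le_refl _)

-- dividing by 10^k does not change the leading digit extracted by repeated //10, as long as 10^k ≤ f
theorem reduce_div_pow (k : ℕ) (f : Int) (h : (10:Int) ^ k ≤ f) :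
    squirrelReduce (PySem.Int.floordiv f (10 ^ k)) = squirrelReduce f := by
  induction k generalizing f with
  | zero =>
    rw [pow_zero, PySem.Int.floordiv_eq_ediv_of_pos (by omega), Int.ediv_one]
  | succ k ih =>
    have hk0 : (0:Int) < 10 ^ k := by positivity
    have hstep : (10:Int) ^ (k + 1) = 10 ^ k * 10 := pow_succ 10 k
    have hf10 : 9 < f := by nlinarith
    have hcomp : PySem.Int.floordiv f (10 ^ (k + 1))
        = PySem.Int.floordiv (PySem.Int.floordiv f 10) (10 ^ k) := by
      rw [PySem.Int.floordiv_eq_ediv_of_pos (by positivity : (0:Int) < 10 ^ (k+1)),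
        PySem.Int.floordiv_eq_ediv_of_pos (by omega : (0:Int) < 10),
        PySem.Int.floordiv_eq_ediv_of_pos hk0,
        Int.ediv_ediv_of_nonneg (by omega : (0:Int) ≤ 10), hstep, mul_comm]
    have hle : (10:Int) ^ k ≤ PySem.Int.floordiv f 10 := by
      rw [PySem.Int.floordiv_eq_ediv_of_pos (by omega : (0:Int) < 10),
        Int.le_ediv_iff_mul_le (by omega : (0:Int) < 10)]
      nlinarith
    rw [hcomp, ih _ hle]
    conv_rhs => rw [squirrelReduce, if_pos hf10]

theorem reduce_eq (n : Int) : altReduce n = squirrelReduce n := by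
  by_cases h : 9 < n
  · rw [altReduce, if_pos h]
    obtain ⟨k, hk1, hkeq, hkle⟩ := powUp_pow10 10 n ⟨1, le_refl 1, by norm_num⟩ (by omega)
    have hp10 : (10:Int) ≤ 10 ^ k :=
      calc (10:Int) = 10 ^ 1 := by norm_num
        _ ≤ 10 ^ k := pow_le_pow_right₀ (by norm_num) hk1
    rw [hkeq, reduce_eq (PySem.Int.floordiv n (10 ^ k))]
    exact reduce_div_pow k n hkle
  · rw [altReduce, if_neg h, squirrelReduce, if_neg h]
termination_by n.toNat
decreasing_by
  have h1 : PySem.Int.floordiv n (10 ^ k) < n := by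
    rw [PySem.Int.floordiv_lt_iff_lt_mul (by positivity : (0:Int) < 10 ^ k)]
    nlinarith
  have h2 : 0 ≤ PySem.Int.floordiv n (10 ^ k) := by
    rw [PySem.Int.floordiv_eq_ediv_of_pos (by positivity : (0:Int) < 10 ^ k)]
    exact Int.ediv_nonneg (by omega) (by positivity)
  omega

theorem squirrel_eq_alt (N : Int) : squirrel N = squirrel_alt N := by
  unfold squirrel squirrel_alt
  rw [reduce_eq, squirrelLoop_eq, prodRange_eq]
  simp

-- ===== VERDICT (by name: the statement is the Claim_ definition above) =====
theorem squirrel_spec : Claim_equal_squirrel := by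
  intro N _
  unfold Spec_squirrel
  exact squirrel_eq_alt N
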